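-- pv_equiv track=rewrite | github.com/dropfred/AoC | aoc-2025-python/day_07.py | part_2
-- ===== SOURCE A (Python) =====
-- from functools import cache
--
-- def part_2(puzzle):
--     w, h = len(puzzle[0]) - 1, len(puzzle) - 1
--
--     @cache
--     def part_2(r, c):
--         if r == h: return 1
--         ts = 0
--         if puzzle[r][c] == '^':
--             if c > 0: ts += part_2(r + 1, c - 1)
--             if c < w: ts += part_2(r + 1, c + 1)
--         else:
--             ts = part_2(r + 1, c)
--         return  ts
--
--     return part_2(1, puzzle[0].index('S'))
-- ===== SOURCE B (Python) =====
-- def _dp_step(w, row, cur):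
--     return [((cur[c - 1] if c > 0 else 0) + (cur[c + 1] if c < w else 0))
--             if row[c] == '^' else cur[c]
--             for c in range(w + 1)]
--
-- def part_2(puzzle):
--     w, h = len(puzzle[0]) - 1, len(puzzle) - 1
--     start = puzzle[0].index('S')
--     cur = [1] * (w + 1)
--     for r in range(h - 1, 0, -1):
--         cur = _dp_step(w, puzzle[r], cur)
--     return cur[start]
-- ===== Notes on version B (the rewrite author's own statement) =====
-- stated objective: alternative
-- what changed: Replaces the memoized top-down recursion over (row, column) with an explicit bottom-up dynamic program that folds a single row-vector of path counts from the bottom row up to row 1.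
-- outside the precondition, e.g. on part_2(['S.', '.', '..']): A returns 1, B raises IndexError
import Mathlib
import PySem

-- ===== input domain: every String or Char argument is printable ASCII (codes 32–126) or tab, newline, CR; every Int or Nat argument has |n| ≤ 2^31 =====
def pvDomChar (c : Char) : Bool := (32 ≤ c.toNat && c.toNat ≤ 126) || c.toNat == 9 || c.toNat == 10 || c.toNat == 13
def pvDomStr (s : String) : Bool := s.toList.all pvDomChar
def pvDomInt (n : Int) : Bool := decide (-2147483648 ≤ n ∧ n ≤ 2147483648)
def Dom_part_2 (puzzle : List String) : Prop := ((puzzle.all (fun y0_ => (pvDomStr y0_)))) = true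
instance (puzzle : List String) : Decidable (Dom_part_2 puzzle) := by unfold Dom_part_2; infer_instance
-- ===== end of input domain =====

-- B replaces A's memoized top-down recursion by a bottom-up row-vector DP (alternative decomposition, same cost).

-- ===== PORT A =====
-- A's inner recursion on (r, c): base r == h returns 1; here the rows still to be crossed,
-- puzzle[r:h], are passed as the recursion's list argument (structural recursion = r increasing to h).
def part2Go (w : Int) : List String → Int → Int
  | [], _ => 1
  | row :: rest, c =>
    if PySem.Str.pyGet? row c = some '^' then
      (if c > 0 then part2Go w rest (c - 1) else 0) +
      (if c < w then part2Go w rest (c + 1) else 0)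
    else part2Go w rest c

def part_2 (puzzle : List String) : Int :=
  let row0 := PySem.List.pyGetD puzzle 0 ""        -- puzzle[0]; in range under Pre_
  let w : Int := PySem.Str.len row0 - 1
  let h : Int := (puzzle.length : Int) - 1
  -- puzzle[0].index('S'): nonnegative under Pre_ ('S' present)
  part2Go w (PySem.List.slice puzzle (some 1) (some h)) (PySem.Str.find row0 "S")

-- ===== PORT B =====
-- one bottom-up DP step: new counts for a row from the counts of the row below
def dpStep (w : Int) (row : String) (cur : List Int) : List Int :=
  (PySem.List.pyRange 0 (w + 1) 1).map (fun c =>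
    if PySem.Str.pyGet? row c = some '^' then
      (if c > 0 then PySem.List.pyGetD cur (c - 1) 0 else 0) +
      (if c < w then PySem.List.pyGetD cur (c + 1) 0 else 0)
    else PySem.List.pyGetD cur c 0)

def part_2_alt (puzzle : List String) : Int :=
  let row0 := PySem.List.pyGetD puzzle 0 ""
  let w : Int := PySem.Str.len row0 - 1
  let h : Int := (puzzle.length : Int) - 1
  let start := PySem.Str.find row0 "S"
  let cur := (PySem.List.pyRange (h - 1) 0 (-1)).foldl
      (fun cur r => dpStep w (PySem.List.pyGetD puzzle r "") cur)
      (List.replicate (w + 1).toNat 1)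
  PySem.List.pyGetD cur start 0

-- ===== PRECONDITION & SPEC =====
-- Pre_ excludes inputs where A raises (empty/one-row grids, no 'S' in row 0) and ragged grids
-- (an interior row shorter than row 0; rows 0 and h are only indexed with in-range columns):
-- on some ragged grids A still returns because its recursion never visits the missing cells,
-- while B scans every column of each interior row and raises IndexError there.
def Pre_part_2 (puzzle : List String) : Prop :=
  2 ≤ puzzle.length ∧
  'S' ∈ (puzzle.headD "").toList ∧
  ∀ row ∈ (puzzle.drop 1).dropLast, (puzzle.headD "").toList.length ≤ row.toList.length
instance (puzzle : List String) : Decidable (Pre_part_2 puzzle) := by unfold Pre_part_2; infer_instance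

def pvWitness_part_2 : List String := (["S.", ".^"])

def Spec_part_2 (puzzle : List String) (out : Int) : Prop := out = part_2_alt puzzle
instance (puzzle : List String) (out : Int) : Decidable (Spec_part_2 puzzle out) := by unfold Spec_part_2; infer_instance

-- ===== CLAIM (what is proved, stated in full; the proofs are below) =====
def Claim_equal_part_2 : Prop := ∀ (puzzle : List String), Dom_part_2 puzzle → Pre_part_2 puzzle → Spec_part_2 puzzle (part_2 puzzle)

-- ===== LEMMAS AND PROOFS =====

-- the bottom-up vector agrees, column by column, with A's top-down recursion
theorem dp_agrees (w : Int) (rows : List String) :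
    ∀ c : Int, 0 ≤ c → c ≤ w →
      PySem.List.pyGetD (List.foldr (dpStep w) (List.replicate (w + 1).toNat 1) rows) c 0
        = part2Go w rows c := by
  induction rows with
  | nil =>
      intro c hc0 hcw
      rw [PySem.List.pyGetD_eq_getElem _ _ hc0 (by simp; omega)]
      simp [part2Go]
  | cons row rest ih =>
      intro c hc0 hcw
      simp only [List.foldr_cons, dpStep]
      rw [PySem.List.pyGetD_map_pyRange_of_nonneg _ _ _ _ hc0 (by omega)]
      simp only [part2Go]
      split
      · congr 1
        · split
          · exact ih (c - 1) (by omega) (by omega)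
          · rfl
        · split
          · exact ih (c + 1) (by omega) (by omega)
          · rfl
      · exact ih c hc0 hcw

theorem part_2_spec_aux (puzzle : List String) (hpre : Pre_part_2 puzzle) :
    part_2 puzzle = part_2_alt puzzle := by
  obtain ⟨hlen, hS, _⟩ := hpre
  obtain ⟨r0, rest, rfl⟩ : ∃ r0 rest, puzzle = r0 :: rest := by
    cases puzzle with
    | nil => simp at hlen
    | cons a l => exact ⟨a, l, rfl⟩
  simp only [List.headD_cons] at hS
  unfold part_2 part_2_alt
  simp only [PySem.List.pyGetD_zero_cons]
  set L : Int := ((r0 :: rest).length : Int) with hL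
  have hL2 : 2 ≤ L := by simp [hL]; exact_mod_cast hlen
  set s := PySem.Str.find r0 "S" with hs
  -- bounds on the start column
  have hfind : PySem.Str.find r0 "S" = PySem.Chars.find r0.toList ['S'] := by
    simp [PySem.Str.find_eq]
  have hinf : ['S'] <:+: r0.toList := by
    obtain ⟨pre, post, h⟩ := List.append_of_mem hS
    exact ⟨pre, post, by simp [h]⟩
  have hs0 : 0 ≤ s := by
    rw [hs, hfind]
    exact (PySem.Chars.find_nonneg_iff _ _).mpr hinf
  have hslt : s < (r0.toList.length : Int) := by
    rw [hs, hfind] at hs0 ⊢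
    obtain ⟨hpref, -⟩ := PySem.Chars.find_spec (s := r0.toList) (sub := ['S']) hs0
    have hne : r0.toList.drop (PySem.Chars.find r0.toList ['S']).toNat ≠ [] := by
      intro h; rw [h] at hpref; simp at hpref
    have hlt : (PySem.Chars.find r0.toList ['S']).toNat < r0.toList.length := by
      by_contra h
      exact hne (List.drop_eq_nil_iff.mpr (by omega))
    omega
  -- B's countdown fold = foldr of dpStep over the rows puzzle[1:h]
  have hrange : PySem.List.pyRange (L - 1 - 1) 0 (-1) = (PySem.List.pyRange 1 (L - 1) 1).reverse := by
    have := PySem.List.pyRange_neg_one_eq_reverse (a := L - 1 - 1) (b := 0)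
    simpa using this
  have hmapfull : (PySem.List.pyRange 1 L 1).map (fun r => PySem.List.pyGetD (r0 :: rest) r "") = (r0 :: rest).drop 1 := by
    have := PySem.List.map_pyGetD_pyRange' (xs := r0 :: rest) (d := "") (a := 1) (by omega)
    simpa [hL] using this
  have hsplit : PySem.List.pyRange 1 L 1 = PySem.List.pyRange 1 (L - 1) 1 ++ [L - 1] := by
    have := PySem.List.pyRange_one_succ_right (a := 1) (b := L - 1) (by omega)
    simpa using this
  have hmap : (PySem.List.pyRange 1 (L - 1) 1).map (fun r => PySem.List.pyGetD (r0 :: rest) r "") = ((r0 :: rest).drop 1).dropLast := by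
    rw [hsplit] at hmapfull
    rw [List.map_append] at hmapfull
    have := congrArg List.dropLast hmapfull
    simpa [List.dropLast_concat] using this
  -- A's slice = the same rows
  have hslice : PySem.List.slice (r0 :: rest) (some 1) (some (L - 1)) = ((r0 :: rest).drop 1).dropLast := by
    rw [PySem.List.slice_toNat _ (by omega) (by omega), List.dropLast_eq_take]
    congr 1
    simp [hL]
  set rows := ((r0 :: rest).drop 1).dropLast with hrows
  set w : Int := PySem.Str.len r0 - 1 with hw
  have hfold :
      (PySem.List.pyRange (L - 1 - 1) 0 (-1)).foldl
        (fun cur r => dpStep w (PySem.List.pyGetD (r0 :: rest) r "") cur)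
        (List.replicate (w + 1).toNat 1)
      = List.foldr (dpStep w) (List.replicate (w + 1).toNat 1) rows := by
    rw [hrange, List.foldl_reverse, ← hmap, List.foldr_map]
  rw [hslice, hfold]
  have hwlen : w = (r0.toList.length : Int) - 1 := by
    simp [hw, PySem.Str.len_eq]
  exact (dp_agrees w rows s hs0 (by omega)).symm

-- ===== VERDICT (by name: the statement is the Claim_ definition above) =====
theorem part_2_spec : Claim_equal_part_2 := by
  intro puzzle _ hpre
  unfold Spec_part_2
  exact part_2_spec_aux puzzle hpre
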